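-- pv_equiv track=rewrite | github.com/karibs/understand_codebase_seconds | backend/services/project_analyzer.py | _resolve_py_import
-- ===== SOURCE A (Python) =====
-- def _resolve_py_import(module_name: str, py_module_map: dict) -> str | None:
--     if module_name in py_module_map:
--         return py_module_map[module_name]
--     parts = module_name.split(".")
--     for i in range(len(parts)):
--         partial = ".".join(parts[i:])
--         if partial in py_module_map:
--             return py_module_map[partial]
--     return None
-- ===== SOURCE B (Python) =====
-- def _resolve_py_import(module_name: str, py_module_map: dict):
--     if module_name in py_module_map:
--         return py_module_map[module_name]
--     _head, dot, rest = module_name.partition(".")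
--     if not dot:
--         return None
--     return _resolve_py_import(rest, py_module_map)
-- ===== Notes on version B (the rewrite author's own statement) =====
-- stated objective: simpler
-- what changed: A splits the name into parts once and re-joins every suffix inside an index loop; B is a short recursion that looks the whole name up and otherwise strips the leading component with str.partition('.'), never materialising the parts list or re-joining suffixes.
import Mathlib
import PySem

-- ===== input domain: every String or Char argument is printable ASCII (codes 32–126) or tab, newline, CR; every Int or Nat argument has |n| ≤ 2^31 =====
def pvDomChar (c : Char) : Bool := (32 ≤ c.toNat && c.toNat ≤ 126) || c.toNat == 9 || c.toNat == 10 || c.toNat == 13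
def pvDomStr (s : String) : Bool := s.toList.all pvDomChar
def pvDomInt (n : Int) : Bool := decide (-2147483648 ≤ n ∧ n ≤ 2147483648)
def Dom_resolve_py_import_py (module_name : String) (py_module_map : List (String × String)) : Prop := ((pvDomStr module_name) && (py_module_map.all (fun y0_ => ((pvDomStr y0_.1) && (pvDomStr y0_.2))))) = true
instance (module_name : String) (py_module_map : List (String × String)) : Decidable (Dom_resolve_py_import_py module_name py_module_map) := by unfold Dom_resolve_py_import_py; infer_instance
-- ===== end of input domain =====

-- B replaces A's split-into-parts plus join-each-suffix loop by a short recursion that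
-- strips the leading component with partition('.'); same result, plainer code (objective: simpler).

-- ===== PORT A =====
-- the 'for i in range(len(parts)):' loop of A, iterating over the remaining indices
def resolve_py_import_py_loop (py_module_map : List (String × String)) (parts : List String) : List Int → Option String
  | [] => none
  | i :: rest =>
    let part := PySem.Str.join "." (PySem.List.slice parts (some i) none)
    match PySem.Dict.get? (PySem.Dict.mk py_module_map) part with
    | some v => some v
    | none => resolve_py_import_py_loop py_module_map parts rest

def resolve_py_import_py (module_name : String) (py_module_map : List (String × String)) : Option String :=
  match PySem.Dict.get? (PySem.Dict.mk py_module_map) module_name with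
  | some v => some v
  | none =>
    let parts := (PySem.Str.split? module_name ".").getD []
    resolve_py_import_py_loop py_module_map parts (PySem.List.pyRange 0 parts.length 1)

-- ===== PORT B =====
-- hand port (PySem has no partition) of the part of str.partition(".") that B uses:
-- the substring after the FIRST '.' (some), or none when there is no '.'; exact for the
-- one-character separator "." since B only tests the middle component and uses the rest.
def partitionAfterDot : List Char → Option (List Char)
  | [] => none
  | c :: cs => if c = '.' then some cs else partitionAfterDot cs

theorem partitionAfterDot_length : ∀ (cs rest : List Char), partitionAfterDot cs = some rest → rest.length < cs.length := by
  intro cs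
  induction cs with
  | nil => intro rest hr; simp [partitionAfterDot] at hr
  | cons c cs ih =>
    intro rest h
    by_cases hc : c = '.'
    · simp [partitionAfterDot, hc] at h; subst h; simp
    · simp [partitionAfterDot, hc] at h
      exact Nat.lt_trans (ih rest h) (by simp)

def resolve_py_import_py_alt_go (py_module_map : List (String × String)) (cs : List Char) : Option String :=
  match PySem.Dict.get? (PySem.Dict.mk py_module_map) (String.ofList cs) with
  | some v => some v
  | none =>
    match h : partitionAfterDot cs with
    | none => none
    | some rest => resolve_py_import_py_alt_go py_module_map rest
termination_by cs.length
decreasing_by exact partitionAfterDot_length _ _ h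

def resolve_py_import_py_alt (module_name : String) (py_module_map : List (String × String)) : Option String :=
  resolve_py_import_py_alt_go py_module_map module_name.toList

-- ===== PRECONDITION & SPEC =====
def Spec_resolve_py_import_py (module_name : String) (py_module_map : List (String × String)) (out : Option String) : Prop := out = resolve_py_import_py_alt module_name py_module_map
instance (module_name : String) (py_module_map : List (String × String)) (out : Option String) : Decidable (Spec_resolve_py_import_py module_name py_module_map out) := by unfold Spec_resolve_py_import_py; infer_instance

-- ===== CLAIM (what is proved, stated in full; the proofs are below) =====
def Claim_equal_resolve_py_import_py : Prop := ∀ (module_name : String) (py_module_map : List (String × String)), Dom_resolve_py_import_py module_name py_module_map → Spec_resolve_py_import_py module_name py_module_map (resolve_py_import_py module_name py_module_map)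

-- ===== LEMMAS AND PROOFS =====

-- reference shape of Chars.splitOn on the separator ['.'], with the prefix accumulator explicit
def msp (pre : List Char) : List Char → List (List Char)
  | [] => [pre]
  | c :: cs => if c = '.' then pre :: msp [] cs else msp (pre ++ [c]) cs

theorem msp_ne_nil (l : List Char) (pre : List Char) : msp pre l ≠ [] := by
  induction l generalizing pre with
  | nil => simp [msp]
  | cons c cs ih =>
    by_cases hc : c = '.'
    · simp only [msp, hc, if_pos rfl]
      simp
    · simp only [msp, hc, if_false]
      exact ih _

theorem splitOn_go_eq : ∀ (fuel : Nat) (l cur : List Char) (acc : List (List Char)), l.length < fuel →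
    PySem.Chars.splitOn.go ['.'] fuel l cur acc = acc.reverse ++ msp cur.reverse l := by
  intro fuel
  induction fuel with
  | zero => intro l cur acc h; omega
  | succ f ih =>
    intro l cur acc h
    cases l with
    | nil => simp [PySem.Chars.splitOn.go, msp]
    | cons c rest =>
      by_cases hc : c = '.'
      · subst hc
        rw [PySem.Chars.splitOn.go]
        simp only [List.isPrefixOf, BEq.refl, Bool.true_and, if_pos]
        rw [show (List.drop ['.'].length ('.' :: rest)) = rest from rfl]
        rw [ih rest [] (cur.reverse :: acc) (by simp at h ⊢; omega)]
        simp [msp]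
      · rw [PySem.Chars.splitOn.go]
        have hpre : ['.'].isPrefixOf (c :: rest) = false := by
          simp [List.isPrefixOf]; exact fun hh => (hc hh.symm).elim
        rw [hpre]
        simp only [Bool.false_eq_true, if_false]
        rw [ih rest (c :: cur) acc (by simp at h ⊢; omega)]
        simp [msp, hc]

theorem splitOn_dot (cs : List Char) : PySem.Chars.splitOn cs ['.'] = msp [] cs := by
  unfold PySem.Chars.splitOn
  rw [splitOn_go_eq (cs.length + 1) cs [] [] (by omega)]
  simp

theorem join_msp (l pre : List Char) : PySem.Chars.join ['.'] (msp pre l) = pre ++ l := by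
  induction l generalizing pre with
  | nil => simp [msp, PySem.Chars.join_singleton]
  | cons c cs ih =>
    by_cases hc : c = '.'
    · obtain ⟨h, t, ht⟩ : ∃ h t, msp ([] : List Char) cs = h :: t := by
        cases hm : msp ([] : List Char) cs with
        | nil => exact absurd hm (msp_ne_nil cs [])
        | cons h t => exact ⟨h, t, rfl⟩
      rw [show msp pre (c :: cs) = pre :: msp [] cs by simp [msp, hc]]
      rw [ht, PySem.Chars.join_cons_cons]
      have hj := ih ([] : List Char)
      rw [ht] at hj
      rw [hj]
      simp [hc]
    · rw [show msp pre (c :: cs) = msp (pre ++ [c]) cs by simp [msp, hc]]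
      rw [ih]
      simp

theorem tail_msp (l pre : List Char) :
    (msp pre l).tail = (match partitionAfterDot l with | none => [] | some rest => msp [] rest) := by
  induction l generalizing pre with
  | nil => simp [msp, partitionAfterDot]
  | cons c cs ih =>
    by_cases hc : c = '.'
    · simp [msp, partitionAfterDot, hc]
    · simp only [msp, partitionAfterDot, hc, if_false]
      exact ih (pre ++ [c])

-- A's suffix scan, expressed on the list of remaining parts
def gs (m : List (String × String)) : List String → Option String
  | [] => none
  | p :: ps =>
    match PySem.Dict.get? (PySem.Dict.mk m) (PySem.Str.join "." (p :: ps)) with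
    | some v => some v
    | none => gs m ps

theorem loop_eq_gs (parts : List String) (m : List (String × String)) :
    ∀ (k : Nat), k ≤ parts.length →
      resolve_py_import_py_loop m parts (PySem.List.pyRange (k : Int) (parts.length : Int) 1) = gs m (parts.drop k) := by
  intro k hk
  induction hn : parts.length - k generalizing k with
  | zero =>
    have hk' : k = parts.length := by omega
    subst hk'
    rw [PySem.List.pyRange_one_eq_nil (by omega)]
    simp [resolve_py_import_py_loop, gs]
  | succ n ih =>
    have hlt : k < parts.length := by omega
    rw [PySem.List.pyRange_one_cons (by exact_mod_cast hlt)]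
    have hdrop : parts.drop k = parts[k] :: parts.drop (k + 1) := List.drop_eq_getElem_cons hlt
    rw [resolve_py_import_py_loop]
    rw [show PySem.List.slice parts (some (k : Int)) none = parts.drop k from PySem.List.slice_from_natCast parts k]
    rw [show ((k : Int) + 1) = ((k + 1 : Nat) : Int) by push_cast; ring]
    rw [ih (k + 1) (by omega) (by omega)]
    rw [hdrop]
    simp only [gs]

theorem join_map_ofList_msp (cs : List Char) :
    PySem.Str.join "." ((msp [] cs).map String.ofList) = String.ofList cs := by
  unfold PySem.Str.join
  have h1 : List.map String.toList ((msp [] cs).map String.ofList) = msp [] cs := by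
    rw [List.map_map]
    have hco : String.toList ∘ String.ofList = id := funext fun l => String.toList_ofList
    rw [hco, List.map_id]
  rw [h1]
  have h2 : (".").toList = ['.'] := rfl
  rw [h2, join_msp cs []]
  simp

theorem alt_go_eq_gs_aux (m : List (String × String)) :
    ∀ (n : Nat) (cs : List Char), cs.length ≤ n →
      gs m ((msp [] cs).map String.ofList) = resolve_py_import_py_alt_go m cs := by
  intro n
  induction n with
  | zero =>
    intro cs hle
    have hnil : cs = [] := by
      cases cs with
      | nil => rfl
      | cons a b => simp at hle
    subst hnil
    rw [resolve_py_import_py_alt_go]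
    rw [show msp ([] : List Char) [] = [[]] from rfl]
    simp only [List.map, gs]
    rw [show PySem.Str.join "." [String.ofList ([] : List Char)] = String.ofList ([] : List Char) by
          rw [← join_map_ofList_msp []]; rfl]
    cases PySem.Dict.get? (PySem.Dict.mk m) (String.ofList ([] : List Char)) with
    | none => simp [partitionAfterDot]
    | some v => simp
  | succ n ih =>
    intro cs hle
    obtain ⟨h, t, ht⟩ : ∃ h t, msp ([] : List Char) cs = h :: t := by
      cases hm : msp ([] : List Char) cs with
      | nil => exact absurd hm (msp_ne_nil cs [])
      | cons h t => exact ⟨h, t, rfl⟩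
    rw [resolve_py_import_py_alt_go, ht]
    simp only [List.map, gs]
    rw [show PySem.Str.join "." (String.ofList h :: t.map String.ofList) =
          String.ofList cs by rw [← join_map_ofList_msp cs, ht]; simp]
    cases PySem.Dict.get? (PySem.Dict.mk m) (String.ofList cs) with
    | some v => simp
    | none =>
      simp only
      have htail : t.map String.ofList = ((msp ([] : List Char) cs).tail).map String.ofList := by
        rw [ht]
        rfl
      rw [htail, tail_msp cs []]
      cases hpd : partitionAfterDot cs with
      | none => simp [gs]
      | some rest =>
        simp only
        exact ih rest (by have := partitionAfterDot_length cs rest hpd; omega)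

theorem alt_go_eq_gs (m : List (String × String)) (cs : List Char) :
    gs m ((msp [] cs).map String.ofList) = resolve_py_import_py_alt_go m cs :=
  alt_go_eq_gs_aux m cs.length cs le_rfl

-- ===== VERDICT (by name: the statement is the Claim_ definition above) =====
theorem resolve_py_import_py_spec : Claim_equal_resolve_py_import_py := by
  unfold Claim_equal_resolve_py_import_py
  intro name m _
  unfold Spec_resolve_py_import_py resolve_py_import_py resolve_py_import_py_alt
  have hsplit : (PySem.Str.split? name ".").getD [] = (msp [] name.toList).map String.ofList := by
    unfold PySem.Str.split?
    rw [show (".").toList = ['.'] from rfl]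
    unfold PySem.Chars.split?
    simp [splitOn_dot]
  simp only [hsplit]
  rw [show ((0 : Int)) = ((0 : Nat) : Int) from rfl,
      loop_eq_gs ((msp [] name.toList).map String.ofList) m 0 (by omega), List.drop_zero,
      alt_go_eq_gs m name.toList]
  cases hget : PySem.Dict.get? (PySem.Dict.mk m) name with
  | some v =>
    rw [resolve_py_import_py_alt_go]
    rw [show String.ofList name.toList = name from String.ofList_toList]
    rw [hget]
  | none => rfl
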